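-- pv_equiv track=rewrite | github.com/JerryPeng0112/advent_of_code_2018 | day21/q2.py | runOptimizedProgram
-- ===== SOURCE A (Python) =====
-- def runOptimizedProgram(num):
--     r4 = 0
--     r4Mem = set()
--     lastR4 = -1
--
--     while True:
--         r3 = r4 | 65536
--         r4 = num
--
--         while True:
--
--             r4 = ((((r3 & 255) + r4) & 16777215) * 65899) & 16777215
--
--             if r3 < 256:
--
--                 # If r4 not found, add it to set
--                 if r4 not in r4Mem:
--                     r4Mem.add(r4)
--                     lastR4 = r4
--                     break
--
--                 # If repeated r4 found, output last r4
--                 else: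
--                     return lastR4
--
--             # Optimized from test program line 18-26
--             r3 = r3 // 256
-- ===== SOURCE B (Python) =====
-- def _step(num, prev):
--     # next value of the recurrence: mix the three base-256 bytes of prev|65536 into num
--     r3 = prev | 65536
--     acc = num
--     for b in (r3 & 255, (r3 >> 8) & 255, r3 >> 16):
--         acc = (((acc + b) & 16777215) * 65899) & 16777215
--     return acc
--
--
-- def runOptimizedProgram(num):
--     # Floyd's tortoise-and-hare cycle detection on x(i) = _step applied i+1 times to 0.
--     # The first value that repeats is x(mu) at index mu+lam; the answer (last new
--     # value) is x(mu+lam-1), recomputed by plain iteration.  O(1) memory, no seen-set.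
--     x0 = _step(num, 0)
--     tort = _step(num, x0)
--     hare = _step(num, _step(num, x0))
--     while tort != hare:
--         tort = _step(num, tort)
--         hare = _step(num, _step(num, hare))
--     # distance mu to the cycle start
--     mu = 0
--     tort = x0
--     while tort != hare:
--         tort = _step(num, tort)
--         hare = _step(num, hare)
--         mu += 1
--     # cycle length lam
--     lam = 1
--     hare = _step(num, tort)
--     while tort != hare:
--         hare = _step(num, hare)
--         lam += 1
--     # answer: the value at index mu + lam - 1
--     v = x0
--     for _ in range(mu + lam - 1):
--         v = _step(num, v)
--     return v
-- ===== Notes on version B (the rewrite author's own statement) =====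
-- stated objective: alternative
-- what changed: A detects the first repeat by storing every value in a seen-set and tracking the last new value; B uses Floyd's tortoise-and-hare cycle detection (O(1) memory, no set): it finds the tail length mu and cycle length lam of the iterated step function and returns the value at index mu+lam-1 by plain re-iteration.
import Mathlib
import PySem

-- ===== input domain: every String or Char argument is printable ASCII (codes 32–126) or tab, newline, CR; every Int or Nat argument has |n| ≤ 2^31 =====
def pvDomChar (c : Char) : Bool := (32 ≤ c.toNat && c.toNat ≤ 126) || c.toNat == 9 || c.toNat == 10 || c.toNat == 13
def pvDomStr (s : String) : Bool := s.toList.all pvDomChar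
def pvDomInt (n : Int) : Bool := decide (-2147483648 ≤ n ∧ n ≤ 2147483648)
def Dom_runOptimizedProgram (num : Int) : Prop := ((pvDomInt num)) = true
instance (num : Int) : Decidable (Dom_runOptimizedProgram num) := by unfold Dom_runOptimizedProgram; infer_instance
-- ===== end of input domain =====

-- B replaces A's seen-set first-repeat detection by Floyd's tortoise-and-hare cycle
-- detection on the iterated step function (O(1) memory instead of a growing set).

-- ===== PORT A =====
-- A's inner `while True` loop: state (r3, r4); fuel 64 is never exhausted on any input
-- (r3 = r4|65536 < 2^24, so the r3 < 256 exit is reached within 3 iterations).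
def pvAInner (fuel : Nat) (r3 r4 : Int) : Int :=
  match fuel with
  | 0 => r4
  | f + 1 =>
    let r4' := PySem.Int.band (PySem.Int.band (PySem.Int.band r3 255 + r4) 16777215 * 65899) 16777215
    if r3 < 256 then r4' else pvAInner f (PySem.Int.floordiv r3 256) r4'

-- A's outer `while True` loop: fuel 2^24+1 is never exhausted on any input (each pass
-- either returns or adds a fresh element of [0, 2^24) to r4Mem).
def pvAOuter (fuel : Nat) (num r4 lastR4 : Int) (r4Mem : PySem.Set Int) : Int :=
  match fuel with
  | 0 => lastR4
  | f + 1 =>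
    let r4' := pvAInner 64 (PySem.Int.bor r4 65536) num
    if !(PySem.Set.contains r4Mem r4') then
      pvAOuter f num r4' r4' (PySem.Set.add r4Mem r4')
    else lastR4

def runOptimizedProgram (num : Int) : Int :=
  pvAOuter 16777217 num 0 (-1) PySem.Set.empty

-- ===== PORT B =====
-- Source B's _step: mix the three base-256 bytes of prev|65536 into num
def pvMix (acc b : Int) : Int :=
  PySem.Int.band (PySem.Int.band (acc + b) 16777215 * 65899) 16777215

def pvStep (num prev : Int) : Int :=
  let r3 := PySem.Int.bor prev 65536
  pvMix (pvMix (pvMix num (PySem.Int.band r3 255)) (PySem.Int.band (r3 >>> 8) 255)) (r3 >>> 16)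

-- Floyd phase 1: advance tortoise by 1 step, hare by 2, until they meet; fuel never runs out
def pvFloydMain (fuel : Nat) (num t h : Int) : Int :=
  match fuel with
  | 0 => h
  | f + 1 =>
    if t ≠ h then pvFloydMain f num (pvStep num t) (pvStep num (pvStep num h)) else h

-- Floyd phase 2: both advance by 1 from the start and the meeting point; counts mu
def pvFindMu (fuel : Nat) (num t h : Int) (mu : Nat) : Int × Nat :=
  match fuel with
  | 0 => (t, mu)
  | f + 1 =>
    if t ≠ h then pvFindMu f num (pvStep num t) (pvStep num h) (mu + 1) else (t, mu)

-- Floyd phase 3: hare walks the cycle from the cycle start; counts lam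
def pvFindLam (fuel : Nat) (num t h : Int) (lam : Nat) : Nat :=
  match fuel with
  | 0 => lam
  | f + 1 =>
    if t ≠ h then pvFindLam f num t (pvStep num h) (lam + 1) else lam

-- Source B's final `for _ in range(n)` re-iteration
def pvAdvance (num : Int) : Nat → Int → Int
  | 0, v => v
  | n + 1, v => pvAdvance num n (pvStep num v)

def runOptimizedProgram_alt (num : Int) : Int :=
  let x0 := pvStep num 0
  let h := pvFloydMain 16777217 num (pvStep num x0) (pvStep num (pvStep num x0))
  let tm := pvFindMu 16777217 num x0 h 0
  let lam := pvFindLam 16777217 num tm.1 (pvStep num tm.1) 1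
  pvAdvance num (tm.2 + lam - 1) x0

-- ===== PRECONDITION & SPEC =====
def Spec_runOptimizedProgram (num : Int) (out : Int) : Prop := out = runOptimizedProgram_alt num
instance (num : Int) (out : Int) : Decidable (Spec_runOptimizedProgram num out) := by unfold Spec_runOptimizedProgram; infer_instance

-- ===== CLAIM (what is proved, stated in full; the proofs are below) =====
def Claim_equal_runOptimizedProgram : Prop := ∀ (num : Int), Dom_runOptimizedProgram num → Spec_runOptimizedProgram num (runOptimizedProgram num)

-- ===== LEMMAS AND PROOFS =====

-- x & 0xFFFFFF lands in [0, 2^24) for every Int x (Python two's-complement `&`)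
lemma pv_band_mask_bounds (x : Int) :
    0 ≤ PySem.Int.band x 16777215 ∧ PySem.Int.band x 16777215 < 16777216 := by
  unfold PySem.Int.band
  norm_num
  split_ifs with h1
  · constructor
    · exact Int.natCast_nonneg _
    · have h := Nat.and_le_right (n := x.toNat) (m := (16777215 : Int).toNat)
      have : (16777215 : Int).toNat = 16777215 := rfl
      omega
  · constructor
    · exact Int.natCast_nonneg _
    · have h := Nat.sub_le ((16777215 : Int).toNat) ((16777215 : Int).toNat &&& (-x - 1).toNat)
      have : (16777215 : Int).toNat = 16777215 := rfl
      omega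

lemma pv_step_bounds (num p : Int) : 0 ≤ pvStep num p ∧ pvStep num p < 16777216 := by
  unfold pvStep pvMix
  exact pv_band_mask_bounds _

lemma pv_band255 (m : Nat) : PySem.Int.band (m : Int) 255 = ((m % 256 : Nat) : Int) := by
  rw [show (255 : Int) = ((255 : Nat) : Int) by norm_num, PySem.Int.band_natCast]
  congr 1
  have := Nat.and_two_pow_sub_one_eq_mod m 8
  norm_num at this
  exact this

lemma pv_floordiv256 (m : Nat) : PySem.Int.floordiv (m : Int) 256 = ((m / 256 : Nat) : Int) := by
  rw [PySem.Int.floordiv_eq_iff_of_pos (by norm_num)]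
  constructor <;> push_cast <;> omega

lemma pv_shift (m k : Nat) : ((m : Int) >>> ((k : Nat) : Int)) = ((m / 2 ^ k : Nat) : Int) := by
  simp [Nat.shiftRight_eq_div_pow]

lemma pvAInner_succ (f : Nat) (r3 r4 : Int) : pvAInner (f+1) r3 r4 =
    (let r4' := PySem.Int.band (PySem.Int.band (PySem.Int.band r3 255 + r4) 16777215 * 65899) 16777215
     if r3 < 256 then r4' else pvAInner f (PySem.Int.floordiv r3 256) r4') := rfl

-- A's inner loop on r3 = p|65536 computes exactly B's pure step function
lemma pv_inner_eq_step (num p : Int) (h0 : 0 ≤ p) (h1 : p < 16777216) :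
    pvAInner 64 (PySem.Int.bor p 65536) num = pvStep num p := by
  have hb : PySem.Int.bor p 65536 = ((p.toNat ||| 65536 : Nat) : Int) := by
    rw [PySem.Int.bor_of_nonneg h0 (by norm_num)]
    congr 1
  set n : Nat := p.toNat ||| 65536 with hn
  have hlo : 65536 ≤ n := Nat.right_le_or
  have hhi : n < 16777216 := by
    have h2 : p.toNat < 2 ^ 24 := by omega
    have h3 := Nat.or_lt_two_pow (x := p.toNat) (y := 65536) (n := 24) h2 (by norm_num)
    omega
  have hd1 : PySem.Int.floordiv (n : Int) 256 = ((n / 256 : Nat) : Int) := pv_floordiv256 n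
  have hd2 : PySem.Int.floordiv ((n / 256 : Nat) : Int) 256 = ((n / 256 / 256 : Nat) : Int) := pv_floordiv256 _
  have hdd : n / 256 / 256 = n / 65536 := by omega
  have hs8 : ((n : Int) >>> (8 : Int)) = ((n / 256 : Nat) : Int) := by
    have := pv_shift n 8; norm_num at this ⊢; exact this
  have hs16 : ((n : Int) >>> (16 : Int)) = ((n / 65536 : Nat) : Int) := by
    have := pv_shift n 16; norm_num at this ⊢; exact this
  rw [show (64 : Nat) = 63 + 1 from rfl, pvAInner_succ]
  simp only [hb]
  rw [if_neg (by exact_mod_cast by omega : ¬ ((n : Int) < 256)), hd1]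
  rw [show (63 : Nat) = 62 + 1 from rfl, pvAInner_succ]
  rw [if_neg (by exact_mod_cast by omega : ¬ (((n / 256 : Nat) : Int) < 256)), hd2]
  rw [show (62 : Nat) = 61 + 1 from rfl, pvAInner_succ]
  rw [if_pos (by exact_mod_cast by omega : (((n / 256 / 256 : Nat) : Int) < 256))]
  simp only [pvStep, pvMix, hb, hs8, hs16, hdd, pv_band255]
  simp only [show n / 65536 % 256 = n / 65536 from by omega]
  ring_nf

-- ---- the iterated sequence x i = step^[i+1] 0 and its rho structure ----

def pvX (num : Int) (i : Nat) : Int := (pvStep num)^[i] (pvStep num 0)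

lemma pvX_succ (num : Int) (i : Nat) : pvX num (i + 1) = pvStep num (pvX num i) :=
  Function.iterate_succ_apply' (pvStep num) i (pvStep num 0)

lemma pvX_bounds (num : Int) (i : Nat) : 0 ≤ pvX num i ∧ pvX num i < 16777216 := by
  induction i with
  | zero => exact pv_step_bounds num 0
  | succ i _ => rw [pvX_succ]; exact pv_step_bounds num _

lemma pvX_add (num : Int) (i t : Nat) : pvX num (i + t) = (pvStep num)^[t] (pvX num i) := by
  unfold pvX
  rw [Nat.add_comm, Function.iterate_add_apply]

lemma pvX_congr (num : Int) (i j t : Nat) (h : pvX num i = pvX num j) :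
    pvX num (i + t) = pvX num (j + t) := by
  rw [pvX_add, pvX_add, h]

-- pigeonhole: the sequence of 2^24-bounded values repeats within 2^24+1 terms
lemma pvRepeat_ex (num : Int) : ∃ k, k ≤ 16777216 ∧ ∃ j, j < k ∧ pvX num j = pvX num k := by
  have hf : ∀ i : Fin 16777217, (pvX num i.val).toNat < 16777216 := by
    intro i
    have := pvX_bounds num i.val
    omega
  obtain ⟨a, b, hne, heq⟩ := Fintype.exists_ne_map_eq_of_card_lt
    (fun i : Fin 16777217 => (⟨(pvX num i.val).toNat, hf i⟩ : Fin 16777216)) (by simp)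
  have hx : pvX num a.val = pvX num b.val := by
    have h1 := (pvX_bounds num a.val).1
    have h2 := (pvX_bounds num b.val).1
    have h3 : (pvX num a.val).toNat = (pvX num b.val).toNat := congrArg Fin.val heq
    omega
  rcases Nat.lt_or_ge a.val b.val with h | h
  · exact ⟨b.val, by omega, a.val, h, hx⟩
  · have hba : b.val < a.val := by
      rcases Nat.lt_or_ge b.val a.val with h' | h'
      · exact h'
      · exact absurd (Fin.ext (by omega)) hne
    exact ⟨a.val, by omega, b.val, hba, hx.symm⟩

lemma pvP_ex (num : Int) : ∃ k, ∃ j, j < k ∧ pvX num j = pvX num k := by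
  obtain ⟨k, _, h⟩ := pvRepeat_ex num
  exact ⟨k, h⟩

def pvK (num : Int) : Nat := Nat.find (pvP_ex num)

lemma pvK_spec (num : Int) : ∃ j, j < pvK num ∧ pvX num j = pvX num (pvK num) :=
  Nat.find_spec (pvP_ex num)

lemma pvK_min (num : Int) (m : Nat) (hm : m < pvK num) :
    ¬ ∃ j, j < m ∧ pvX num j = pvX num m :=
  Nat.find_min (pvP_ex num) hm

lemma pvK_le (num : Int) : pvK num ≤ 16777216 := by
  obtain ⟨k, hk, h⟩ := pvRepeat_ex num
  exact le_trans (Nat.find_min' (pvP_ex num) h) hk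

lemma pvK_pos (num : Int) : 1 ≤ pvK num := by
  obtain ⟨j, hj, _⟩ := pvK_spec num
  omega

-- injectivity before the first repeat
lemma pvX_inj (num : Int) (i j : Nat) (hij : i < j) (hj : j < pvK num) :
    pvX num i ≠ pvX num j := fun h => pvK_min num j hj ⟨i, hij, h⟩

def pvMuEx (num : Int) : ∃ j, j < pvK num ∧ pvX num j = pvX num (pvK num) := pvK_spec num

def pvMu (num : Int) : Nat := Nat.find (pvMuEx num)

def pvLam (num : Int) : Nat := pvK num - pvMu num

lemma pvMu_spec (num : Int) : pvMu num < pvK num ∧ pvX num (pvMu num) = pvX num (pvK num) :=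
  Nat.find_spec (pvMuEx num)

lemma pvMuLam (num : Int) : pvMu num + pvLam num = pvK num := by
  have := (pvMu_spec num).1
  unfold pvLam
  omega

lemma pvLam_pos (num : Int) : 1 ≤ pvLam num := by
  have := (pvMu_spec num).1
  unfold pvLam
  omega

-- one period: x (i + lam) = x i for i ≥ mu
lemma pv_per_one (num : Int) (i : Nat) (hi : pvMu num ≤ i) :
    pvX num (i + pvLam num) = pvX num i := by
  induction i, hi using Nat.le_induction with
  | base =>
    rw [pvMuLam num]
    exact (pvMu_spec num).2.symm
  | succ i hi ih =>
    have : i + 1 + pvLam num = (i + pvLam num) + 1 := by omega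
    rw [this, pvX_succ, ih, pvX_succ]

-- multiples of the period
lemma pv_per_mul (num : Int) (i t : Nat) (hi : pvMu num ≤ i) :
    pvX num (i + t * pvLam num) = pvX num i := by
  induction t with
  | zero => simp
  | succ t ih =>
    have : i + (t + 1) * pvLam num = (i + t * pvLam num) + pvLam num := by ring
    rw [this, pv_per_one num _ (by omega), ih]

-- a p-period at index i propagates to all k ≥ i
lemma pv_per_prop (num : Int) (i p k : Nat) (hp : pvX num i = pvX num (i + p))
    (hk : i ≤ k) : pvX num (k + p) = pvX num k := by
  have h1 : k = i + (k - i) := by omega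
  rw [h1]
  have := pvX_congr num (i + p) i (k - i) hp.symm
  rw [show i + p + (k - i) = i + (k - i) + p by omega] at this
  exact this

-- any repeat x i = x (i+p) (p ≥ 1) forces mu ≤ i
lemma pv_mu_le (num : Int) (i p : Nat) (hp : 1 ≤ p) (h : pvX num i = pvX num (i + p)) :
    pvMu num ≤ i := by
  by_contra hc
  have hc' : i < pvMu num := Nat.lt_of_not_le hc
  -- x i = x (i + t*p) for every t
  have hmul : ∀ t, pvX num (i + t * p) = pvX num i := by
    intro t
    induction t with
    | zero => simp
    | succ t ih =>
      have he : i + (t + 1) * p = (i + t * p) + p := by ring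
      rw [he, pv_per_prop num i p (i + t * p) h (by omega), ih]
  -- land beyond mu and use the lam-period to come back
  have hbig : pvMu num ≤ i + pvMu num * p := by
    have : pvMu num ≤ pvMu num * p := Nat.le_mul_of_pos_right _ (by omega)
    omega
  clear hc
  have h2 : pvX num (i + pvLam num) = pvX num i := by
    have h3 := pvX_congr num i (i + pvMu num * p) (pvLam num) (hmul (pvMu num)).symm
    rw [h3, show i + pvMu num * p + pvLam num = (i + pvMu num * p) + pvLam num from rfl,
      pv_per_one num _ hbig, hmul]
  exact pvX_inj num i (i + pvLam num) (by have := pvLam_pos num; omega)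
    (by have := pvMuLam num; omega) h2.symm

-- any repeat with i ≥ mu has period divisible by lam
lemma pv_lam_dvd (num : Int) (i p : Nat) (_hi : pvMu num ≤ i)
    (h : pvX num i = pvX num (i + p)) : pvLam num ∣ p := by
  -- first move the p-period down to mu
  have hb : i ≤ pvMu num + i * pvLam num := by
    have : i ≤ i * pvLam num := Nat.le_mul_of_pos_right _ (pvLam_pos num)
    omega
  have h1 : pvX num (pvMu num + i * pvLam num) = pvX num (pvMu num) :=
    pv_per_mul num (pvMu num) i (Nat.le_refl _)
  have h2 := pvX_congr num (pvMu num) (pvMu num + i * pvLam num) p h1.symm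
  have h3 := pv_per_prop num i p (pvMu num + i * pvLam num) h hb
  have hmu : pvX num (pvMu num) = pvX num (pvMu num + p) :=
    (h2.trans (h3.trans h1)).symm
  -- reduce p mod lam
  have hsplit : pvMu num + p = (pvMu num + p % pvLam num) + (p / pvLam num) * pvLam num := by
    have ha := Nat.div_add_mod p (pvLam num)
    have hcm : pvLam num * (p / pvLam num) = (p / pvLam num) * pvLam num := Nat.mul_comm _ _
    omega
  have h4 : pvX num ((pvMu num + p % pvLam num) + (p / pvLam num) * pvLam num)
      = pvX num (pvMu num + p % pvLam num) :=
    pv_per_mul num (pvMu num + p % pvLam num) (p / pvLam num) (by omega)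
  have hr : pvX num (pvMu num) = pvX num (pvMu num + p % pvLam num) :=
    (hmu.trans (congrArg (pvX num) hsplit)).trans h4
  rcases Nat.eq_zero_or_pos (p % pvLam num) with h0 | h0
  · exact Nat.dvd_of_mod_eq_zero h0
  · exfalso
    have hlt : p % pvLam num < pvLam num := Nat.mod_lt _ (pvLam_pos num)
    exact pvX_inj num (pvMu num) (pvMu num + p % pvLam num) (by omega)
      (by have := pvMuLam num; omega) hr

-- divisible period applies at any i ≥ mu
lemma pv_per_dvd (num : Int) (i p : Nat) (hi : pvMu num ≤ i) (hd : pvLam num ∣ p) :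
    pvX num (i + p) = pvX num i := by
  obtain ⟨t, ht⟩ := hd
  rw [ht, show pvLam num * t = t * pvLam num by ring]
  exact pv_per_mul num i t hi

-- ---- Floyd phase 1: the first meeting index m0 ----

def pvW (num : Int) : Nat := pvLam num * ((pvMu num + pvLam num) / pvLam num)

lemma pvW_props (num : Int) : pvMu num < pvW num ∧ pvW num ≤ pvK num := by
  have h1 := Nat.div_add_mod (pvMu num + pvLam num) (pvLam num)
  have h2 : (pvMu num + pvLam num) % pvLam num < pvLam num := Nat.mod_lt _ (pvLam_pos num)
  have h3 := pvMuLam num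
  unfold pvW
  omega

lemma pvW_meet (num : Int) : pvX num (pvW num) = pvX num (2 * pvW num) := by
  have hd : pvLam num ∣ pvW num := Dvd.intro _ rfl
  have hmu : pvMu num ≤ pvW num := le_of_lt (pvW_props num).1
  rw [show 2 * pvW num = pvW num + pvW num by ring, pv_per_dvd num _ _ hmu hd]

lemma pvM0_ex (num : Int) : ∃ m, 1 ≤ m ∧ pvX num m = pvX num (2 * m) :=
  ⟨pvW num, by have := (pvW_props num).1; omega, pvW_meet num⟩

def pvM0 (num : Int) : Nat := Nat.find (pvM0_ex num)

lemma pvM0_spec (num : Int) : 1 ≤ pvM0 num ∧ pvX num (pvM0 num) = pvX num (2 * pvM0 num) :=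
  Nat.find_spec (pvM0_ex num)

lemma pvM0_min (num : Int) (m : Nat) (h1 : 1 ≤ m) (h2 : pvX num m = pvX num (2 * m)) :
    pvM0 num ≤ m := Nat.find_min' (pvM0_ex num) ⟨h1, h2⟩

lemma pvM0_props (num : Int) : pvMu num ≤ pvM0 num ∧ pvLam num ∣ pvM0 num := by
  have h := pvM0_spec num
  have h2 : pvX num (pvM0 num) = pvX num (pvM0 num + pvM0 num) := by
    rw [show pvM0 num + pvM0 num = 2 * pvM0 num by ring]; exact h.2
  exact ⟨pv_mu_le num _ _ h.1 h2, pv_lam_dvd num _ _ (pv_mu_le num _ _ h.1 h2) h2⟩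

lemma pvM0_le (num : Int) : pvM0 num ≤ pvK num :=
  le_trans (pvM0_min num (pvW num) (by have := (pvW_props num).1; omega) (pvW_meet num))
    (pvW_props num).2

-- phase-1 loop finds x m0
lemma pvFloydMain_eq (num : Int) : ∀ (fuel m : Nat), 1 ≤ m → m ≤ pvM0 num →
    pvM0 num < m + fuel →
    pvFloydMain fuel num (pvX num m) (pvX num (2 * m)) = pvX num (pvM0 num) := by
  intro fuel
  induction fuel with
  | zero => intro m _ _ h; omega
  | succ f ih =>
    intro m h1 h2 h3
    unfold pvFloydMain
    by_cases heq : pvX num m = pvX num (2 * m)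
    · rw [if_neg (by simpa using heq)]
      have := pvM0_min num m h1 heq
      have hm : m = pvM0 num := by omega
      rw [← heq, hm]
    · rw [if_pos (by simpa using heq)]
      have hne : m ≠ pvM0 num := by
        intro h; exact heq (h ▸ (pvM0_spec num).2)
      have e1 : pvStep num (pvX num m) = pvX num (m + 1) := (pvX_succ num m).symm
      have e2 : pvX num (2 * (m + 1)) = pvStep num (pvStep num (pvX num (2 * m))) := by
        rw [show 2 * (m + 1) = 2 * m + 1 + 1 by ring, pvX_succ, pvX_succ]
      rw [e1, ← e2]
      exact ih (m + 1) (by omega) (by omega) (by omega)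

-- test used by phase 2: x k = x (m0 + k) iff mu ≤ k
lemma pv_mu_test (num : Int) (k : Nat) :
    pvX num k = pvX num (pvM0 num + k) ↔ pvMu num ≤ k := by
  constructor
  · intro h
    exact pv_mu_le num k (pvM0 num) (pvM0_spec num).1
      (by rw [show k + pvM0 num = pvM0 num + k by ring]; exact h)
  · intro h
    rw [show pvM0 num + k = k + pvM0 num by ring,
      pv_per_dvd num k (pvM0 num) h (pvM0_props num).2]

lemma pvFindMu_eq (num : Int) : ∀ (fuel k : Nat), k ≤ pvMu num → pvMu num < k + fuel →
    pvFindMu fuel num (pvX num k) (pvX num (pvM0 num + k)) k = (pvX num (pvMu num), pvMu num) := by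
  intro fuel
  induction fuel with
  | zero => intro k _ h; omega
  | succ f ih =>
    intro k h1 h2
    unfold pvFindMu
    by_cases heq : pvX num k = pvX num (pvM0 num + k)
    · rw [if_neg (by simpa using heq)]
      have hk : pvMu num ≤ k := (pv_mu_test num k).mp heq
      have : k = pvMu num := by omega
      rw [this]
    · rw [if_pos (by simpa using heq)]
      have hk : k ≠ pvMu num := by
        intro h
        exact heq (h ▸ ((pv_mu_test num (pvMu num)).mpr (Nat.le_refl _)))
      have e1 : pvStep num (pvX num k) = pvX num (k + 1) := (pvX_succ num k).symm
      have e2 : pvStep num (pvX num (pvM0 num + k)) = pvX num (pvM0 num + (k + 1)) := by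
        rw [show pvM0 num + (k + 1) = (pvM0 num + k) + 1 by ring]
        exact (pvX_succ num _).symm
      rw [e1, e2]
      exact ih (k + 1) (by omega) (by omega)

-- test used by phase 3: x mu = x (mu + l) iff lam ∣ l
lemma pv_lam_test (num : Int) (l : Nat) :
    pvX num (pvMu num) = pvX num (pvMu num + l) ↔ pvLam num ∣ l :=
  ⟨fun h => pv_lam_dvd num (pvMu num) l (Nat.le_refl _) h,
   fun h => (pv_per_dvd num (pvMu num) l (Nat.le_refl _) h).symm⟩

lemma pvFindLam_eq (num : Int) : ∀ (fuel l : Nat), 1 ≤ l → l ≤ pvLam num →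
    pvLam num < l + fuel →
    pvFindLam fuel num (pvX num (pvMu num)) (pvX num (pvMu num + l)) l = pvLam num := by
  intro fuel
  induction fuel with
  | zero => intro l _ _ h; omega
  | succ f ih =>
    intro l h1 h2 h3
    unfold pvFindLam
    by_cases heq : pvX num (pvMu num) = pvX num (pvMu num + l)
    · rw [if_neg (by simpa using heq)]
      have hd : pvLam num ∣ l := (pv_lam_test num l).mp heq
      have hle : pvLam num ≤ l := Nat.le_of_dvd (by omega) hd
      omega
    · rw [if_pos (by simpa using heq)]
      have hl : l ≠ pvLam num := by
        intro h
        exact heq (h ▸ ((pv_lam_test num (pvLam num)).mpr dvd_rfl))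
      have e2 : pvStep num (pvX num (pvMu num + l)) = pvX num (pvMu num + (l + 1)) := by
        rw [show pvMu num + (l + 1) = (pvMu num + l) + 1 by ring]
        exact (pvX_succ num _).symm
      rw [e2]
      exact ih (l + 1) (by omega) (by omega) (by omega)

lemma pvAdvance_eq (num : Int) : ∀ (n : Nat) (v : Int), pvAdvance num n v = (pvStep num)^[n] v := by
  intro n
  induction n with
  | zero => intro v; rfl
  | succ n ih =>
    intro v
    show pvAdvance num n (pvStep num v) = _
    rw [ih, ← Function.iterate_succ_apply]

-- B computes x (K - 1)
lemma pvB_eq (num : Int) : runOptimizedProgram_alt num = pvX num (pvK num - 1) := by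
  simp only [runOptimizedProgram_alt]
  have hx0 : pvStep num 0 = pvX num 0 := rfl
  have hK := pvK_le num
  have hKpos := pvK_pos num
  have hmuK := pvMuLam num
  have hlam := pvLam_pos num
  have hmu_lt : pvMu num < pvK num := (pvMu_spec num).1
  have hm0 := pvM0_le num
  -- phase 1
  have e1 : pvStep num (pvX num 0) = pvX num 1 := (pvX_succ num 0).symm
  have e2 : pvStep num (pvStep num (pvX num 0)) = pvX num 2 := by
    rw [e1]; exact (pvX_succ num 1).symm
  rw [hx0, e2, e1]
  rw [show pvX num 2 = pvX num (2 * 1) by norm_num,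
    pvFloydMain_eq num 16777217 1 (Nat.le_refl _) (pvM0_spec num).1 (by omega)]
  -- phase 2
  rw [show pvX num (pvM0 num) = pvX num (pvM0 num + 0) by norm_num,
    pvFindMu_eq num 16777217 0 (by omega) (by omega)]
  -- phase 3
  rw [show pvStep num (pvX num (pvMu num)) = pvX num (pvMu num + 1) by rw [← pvX_succ]]
  rw [pvFindLam_eq num 16777217 1 (Nat.le_refl _) hlam (by omega)]
  -- final advance
  rw [pvAdvance_eq]
  rw [← pvX_add num 0 (pvMu num + pvLam num - 1)]
  have he : 0 + (pvMu num + pvLam num - 1) = pvK num - 1 := by omega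
  rw [he]

-- ---- A computes x (K - 1) ----

def pvMemN (num : Int) : Nat → PySem.Set Int
  | 0 => PySem.Set.empty
  | i + 1 => PySem.Set.add (pvMemN num i) (pvX num i)

lemma pv_mem_pvMemN (num : Int) (i : Nat) (v : Int) :
    v ∈ pvMemN num i ↔ ∃ j, j < i ∧ pvX num j = v := by
  induction i with
  | zero =>
    simp [pvMemN, PySem.Set.empty]
  | succ i ih =>
    show v ∈ PySem.Set.add (pvMemN num i) (pvX num i) ↔ _
    rw [PySem.Set.mem_add, ih]
    constructor
    · rintro (⟨j, hj, hv⟩ | h)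
      · exact ⟨j, by omega, hv⟩
      · exact ⟨i, by omega, h.symm⟩
    · rintro ⟨j, hj, hv⟩
      rcases Nat.lt_or_ge j i with h | h
      · exact Or.inl ⟨j, h, hv⟩
      · have hji : j = i := by omega
        exact Or.inr (hji ▸ hv).symm

def pvPrevV (num : Int) : Nat → Int
  | 0 => 0
  | i + 1 => pvX num i

def pvLastV (num : Int) : Nat → Int
  | 0 => -1
  | i + 1 => pvX num i

lemma pv_step_prev (num : Int) (i : Nat) : pvStep num (pvPrevV num i) = pvX num i := by
  cases i with
  | zero => rfl
  | succ i => exact (pvX_succ num i).symm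

lemma pv_prev_bounds (num : Int) (i : Nat) : 0 ≤ pvPrevV num i ∧ pvPrevV num i < 16777216 := by
  cases i with
  | zero => norm_num [pvPrevV]
  | succ i => exact pvX_bounds num i

lemma pvAOuter_eq (num : Int) : ∀ (fuel i : Nat), i ≤ pvK num → pvK num < i + fuel →
    pvAOuter fuel num (pvPrevV num i) (pvLastV num i) (pvMemN num i) = pvX num (pvK num - 1) := by
  intro fuel
  induction fuel with
  | zero => intro i _ h; omega
  | succ f ih =>
    intro i h1 h2
    have hb := pv_prev_bounds num i
    have hstep : pvAInner 64 (PySem.Int.bor (pvPrevV num i) 65536) num = pvX num i := by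
      rw [pv_inner_eq_step num _ hb.1 hb.2, pv_step_prev num i]
    simp only [pvAOuter, hstep]
    by_cases hc : pvX num i ∈ pvMemN num i
    · -- found a repeat: i = K, return last = x (K-1)
      have hct : PySem.Set.contains (pvMemN num i) (pvX num i) = true := by
        simpa [PySem.Set.contains] using hc
      rw [hct]
      simp only [Bool.not_true, Bool.false_eq_true, if_false]
      have hrep : ∃ j, j < i ∧ pvX num j = pvX num i := (pv_mem_pvMemN num i _).mp hc
      have hiK : i = pvK num := by
        rcases Nat.lt_or_ge i (pvK num) with h | h
        · exact absurd hrep (pvK_min num i h)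
        · omega
      have hKpos := pvK_pos num
      have hgen : ∀ n, 1 ≤ n → pvLastV num n = pvX num (n - 1) := by
        intro n hn
        cases n with
        | zero => omega
        | succ m => simp [pvLastV]
      rw [hiK, hgen (pvK num) hKpos]
    · -- fresh value: add it and recurse
      have hct : PySem.Set.contains (pvMemN num i) (pvX num i) = false := by
        simp [PySem.Set.contains]
        exact hc
      rw [hct]
      simp only [Bool.not_false, if_true]
      have hlt : i < pvK num := by
        rcases Nat.lt_or_ge i (pvK num) with h | h
        · exact h
        · exfalso
          have hiK : i = pvK num := by omega
          exact hc ((pv_mem_pvMemN num i _).mpr (hiK ▸ pvK_spec num))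
      have hnext : PySem.Set.add (pvMemN num i) (pvX num i) = pvMemN num (i + 1) := rfl
      rw [hnext]
      exact ih (i + 1) (by omega) (by omega)

lemma pvA_eq (num : Int) : runOptimizedProgram num = pvX num (pvK num - 1) := by
  unfold runOptimizedProgram
  have := pvAOuter_eq num 16777217 0 (by omega) (by have := pvK_le num; omega)
  simpa [pvPrevV, pvLastV, pvMemN] using this

-- ===== VERDICT (by name: the statement is the Claim_ definition above) =====
theorem runOptimizedProgram_spec : Claim_equal_runOptimizedProgram := by
  intro num _
  show runOptimizedProgram num = runOptimizedProgram_alt num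
  rw [pvA_eq, pvB_eq]
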